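-- pv_equiv track=rewrite | github.com/nikita-kostin/active-time-scheduling | utils/maximum_matching.py | _get_contracted_ids
-- ===== SOURCE A (Python) =====
-- from typing import Any, Dict, Iterable, List, Optional, Set, Tuple
--
-- def _get_contracted_ids(n: int, blossom_set: Set[int]) -> Tuple[Dict[int, int], Dict[int, int]]:
--     current_contracted_id = 1
--
--     id_to_contracted = {}
--     contracted_to_id = {}
--
--     for u in range(n):
--         if u in blossom_set:
--             id_to_contracted[u] = 0
--         if u not in blossom_set:
--             id_to_contracted[u] = current_contracted_id
--             contracted_to_id[current_contracted_id] = u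
--             current_contracted_id += 1
--
--     return id_to_contracted, contracted_to_id
-- ===== SOURCE B (Python) =====
-- def _get_contracted_ids(n, blossom_set):
--     # Sort the blossom vertices inside [0, n); the non-blossom vertices are the
--     # concatenation of the gap ranges between consecutive sorted blossom
--     # vertices, so no per-vertex membership test and no running counter is needed.
--     bs = sorted(v for v in blossom_set if 0 <= v < n)
--     segments = []
--     prev = 0
--     for v in bs:
--         segments.append(range(prev, v))
--         prev = v + 1
--     segments.append(range(prev, n))
--     non_blossom = [u for seg in segments for u in seg]
--     contracted_to_id = dict(enumerate(non_blossom, start=1))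
--     cmap = {u: c for c, u in contracted_to_id.items()}
--     id_to_contracted = {u: cmap.get(u, 0) for u in range(n)}
--     return id_to_contracted, contracted_to_id
-- ===== Notes on version B (the rewrite author's own statement) =====
-- stated objective: alternative
-- what changed: Instead of A's scan of range(n) that tests blossom membership per vertex and threads a running counter, B sorts the blossom vertices inside [0,n), concatenates the gap ranges between consecutive sorted blossom vertices to obtain the non-blossom list directly, numbers it with enumerate(start=1) to get contracted_to_id, and builds id_to_contracted by inverting that dict and defaulting to 0.
import Mathlib
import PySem

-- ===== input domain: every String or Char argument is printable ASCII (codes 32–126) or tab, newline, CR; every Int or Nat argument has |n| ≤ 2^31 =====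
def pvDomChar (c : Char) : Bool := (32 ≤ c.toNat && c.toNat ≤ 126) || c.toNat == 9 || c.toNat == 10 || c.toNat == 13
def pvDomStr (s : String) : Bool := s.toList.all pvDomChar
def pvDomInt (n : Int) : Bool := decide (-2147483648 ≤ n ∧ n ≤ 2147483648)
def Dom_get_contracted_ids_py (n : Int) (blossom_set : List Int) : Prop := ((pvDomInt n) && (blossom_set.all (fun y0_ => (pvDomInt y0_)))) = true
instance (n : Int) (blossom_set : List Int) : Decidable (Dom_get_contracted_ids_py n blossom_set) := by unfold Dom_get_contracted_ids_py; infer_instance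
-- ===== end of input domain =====

-- B replaces A's membership-testing counter loop by sorting the blossom vertices and
-- concatenating the gap ranges between them (alternative decomposition, similar cost).

-- ===== PORT A =====
def get_contracted_ids_py (n : Int) (blossom_set : List Int) : (List (Int × Int)) × (List (Int × Int)) :=
  -- current_contracted_id = 1; id_to_contracted = {}; contracted_to_id = {}; for u in range(n): …
  let st := (PySem.List.pyRange 0 n 1).foldl
    (fun (st : PySem.Dict Int Int × PySem.Dict Int Int × Int) u =>
      -- if u in blossom_set: id_to_contracted[u] = 0
      let st := if blossom_set.contains u then (st.1.insert u 0, st.2.1, st.2.2) else st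
      -- if u not in blossom_set: id_to_contracted[u] = cur; contracted_to_id[cur] = u; cur += 1
      if !(blossom_set.contains u) then (st.1.insert u st.2.2, st.2.1.insert st.2.2 u, st.2.2 + 1) else st)
    (PySem.Dict.empty, PySem.Dict.empty, 1)
  (st.1.items, st.2.1.items)

-- ===== PORT B =====
def get_contracted_ids_py_alt (n : Int) (blossom_set : List Int) : (List (Int × Int)) × (List (Int × Int)) :=
  -- bs = sorted(v for v in blossom_set if 0 <= v < n)
  let bs := PySem.List.sorted (blossom_set.filter (fun v => decide (0 ≤ v) && decide (v < n))) (fun x => x)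
  -- segments = []; prev = 0; for v in bs: segments.append(range(prev, v)); prev = v + 1
  let st := bs.foldl (fun (st : List (List Int) × Int) v => (st.1 ++ [PySem.List.pyRange st.2 v 1], v + 1)) ([], 0)
  -- segments.append(range(prev, n))
  let segments := st.1 ++ [PySem.List.pyRange st.2 n 1]
  -- non_blossom = [u for seg in segments for u in seg]
  let non_blossom := segments.flatten
  -- contracted_to_id = dict(enumerate(non_blossom, start=1))
  let contracted_to_id := PySem.List.enumerate non_blossom 1
  -- cmap = {u: c for c, u in contracted_to_id.items()}
  let cmap := (contracted_to_id.map (fun p => (p.2, p.1))).foldl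
    (fun (d : PySem.Dict Int Int) p => d.insert p.1 p.2) PySem.Dict.empty
  -- id_to_contracted = {u: cmap.get(u, 0) for u in range(n)}  (keys 0..n-1 are distinct)
  let id_to_contracted := (PySem.List.pyRange 0 n 1).map (fun u => (u, cmap.getD u 0))
  (id_to_contracted, contracted_to_id)

-- ===== PRECONDITION & SPEC =====
def Spec_get_contracted_ids_py (n : Int) (blossom_set : List Int) (out : (List (Int × Int)) × (List (Int × Int))) : Prop := out = get_contracted_ids_py_alt n blossom_set
instance (n : Int) (blossom_set : List Int) (out : (List (Int × Int)) × (List (Int × Int))) : Decidable (Spec_get_contracted_ids_py n blossom_set out) := by unfold Spec_get_contracted_ids_py; infer_instance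

-- ===== CLAIM (what is proved, stated in full; the proofs are below) =====
def Claim_equal_get_contracted_ids_py : Prop := ∀ (n : Int) (blossom_set : List Int), Dom_get_contracted_ids_py n blossom_set → Spec_get_contracted_ids_py n blossom_set (get_contracted_ids_py n blossom_set)

-- ===== LEMMAS AND PROOFS =====

-- the id_to_contracted items A produces while scanning xs with next fresh id c
def specI (B : List Int) : List Int → Int → List (Int × Int)
  | [], _ => []
  | u :: t, c => if B.contains u then (u, 0) :: specI B t c else (u, c) :: specI B t (c + 1)

-- the contracted_to_id items A produces while scanning xs with next fresh id c
def specC (B : List Int) : List Int → Int → List (Int × Int)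
  | [], _ => []
  | u :: t, c => if B.contains u then specC B t c else (c, u) :: specC B t (c + 1)

-- A's loop body, named for the proofs (definitionally the lambda in the port)
def aStep (B : List Int) (st : PySem.Dict Int Int × PySem.Dict Int Int × Int) (u : Int) :
    PySem.Dict Int Int × PySem.Dict Int Int × Int :=
  let st := if B.contains u then (st.1.insert u 0, st.2.1, st.2.2) else st
  if !(B.contains u) then (st.1.insert u st.2.2, st.2.1.insert st.2.2 u, st.2.2 + 1) else st

theorem aStep_mem (B : List Int) (st : PySem.Dict Int Int × PySem.Dict Int Int × Int) (u : Int)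
    (hb : B.contains u = true) : aStep B st u = (st.1.insert u 0, st.2.1, st.2.2) := by
  have hm : u ∈ B := by simpa using hb
  simp [aStep, hm]

theorem aStep_not_mem (B : List Int) (st : PySem.Dict Int Int × PySem.Dict Int Int × Int) (u : Int)
    (hb : B.contains u = false) :
    aStep B st u = (st.1.insert u st.2.2, st.2.1.insert st.2.2 u, st.2.2 + 1) := by
  have hm : u ∉ B := by simpa using hb
  simp [aStep, hm]

theorem foldl_insert_get?_of_not_key (ps : List (Int × Int)) (d : PySem.Dict Int Int) (u : Int)
    (h : ∀ p ∈ ps, p.1 ≠ u) :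
    (ps.foldl (fun (d : PySem.Dict Int Int) p => d.insert p.1 p.2) d).get? u = d.get? u := by
  induction ps generalizing d with
  | nil => rfl
  | cons p t ih =>
    simp only [List.foldl_cons]
    rw [ih _ (fun q hq => h q (List.mem_cons_of_mem _ hq)),
        PySem.Dict.get?_insert_of_ne _ _ (Ne.symm (h p (List.mem_cons_self)))]

theorem mem_swap_enumerate_filter (B : List Int) (xs : List Int) (c : Int) (p : Int × Int)
    (hp : p ∈ (PySem.List.enumerate (xs.filter (fun u => !(B.contains u))) c).map (fun p => (p.2, p.1))) :
    p.1 ∈ xs := by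
  rcases List.mem_map.1 hp with ⟨q, hq, rfl⟩
  rcases (PySem.List.mem_enumerate_iff _ _ _).1 hq with ⟨k, hk, rfl⟩
  exact List.mem_of_mem_filter (List.getElem_mem hk)

-- A's loop, stated over an arbitrary suffix with accumulators
theorem a_loop (B : List Int) (xs : List Int) (D1 D2 : PySem.Dict Int Int) (c : Int)
    (hnd : xs.Nodup) (hD1 : ∀ u ∈ xs, D1.get? u = none) (hD2 : ∀ k, c ≤ k → D2.get? k = none) :
    (xs.foldl (aStep B) (D1, D2, c)).1.items = D1.items ++ specI B xs c ∧
    (xs.foldl (aStep B) (D1, D2, c)).2.1.items = D2.items ++ specC B xs c := by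
  induction xs generalizing D1 D2 c with
  | nil => simp [specI, specC]
  | cons u t ih =>
    have hnd' := (List.nodup_cons.1 hnd).2
    have hu : u ∉ t := (List.nodup_cons.1 hnd).1
    have hD1u : D1.get? u = none := hD1 u List.mem_cons_self
    have hc1 : D1.contains u = false := (PySem.Dict.get?_eq_none_iff_contains D1 u).1 hD1u
    by_cases hb : B.contains u = true
    · -- blossom: only id_to_contracted grows, with value 0
      rw [List.foldl_cons, aStep_mem B _ u hb]
      have h1 : ∀ v ∈ t, (D1.insert u 0).get? v = none := by
        intro v hv
        rw [PySem.Dict.get?_insert_of_ne _ _ (by rintro rfl; exact hu hv)]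
        exact hD1 v (List.mem_cons_of_mem _ hv)
      have := ih (D1.insert u 0) D2 c hnd' h1 hD2
      rw [this.1, this.2]
      rw [PySem.Dict.items_insert_of_not_contains _ _ hc1]
      have hm : u ∈ B := by simpa using hb
      simp [specI, specC, hm]
    · -- non-blossom: both dicts grow, counter increments
      have hbf : B.contains u = false := by simpa using hb
      rw [List.foldl_cons, aStep_not_mem B _ u hbf]
      have h1 : ∀ v ∈ t, (D1.insert u c).get? v = none := by
        intro v hv
        rw [PySem.Dict.get?_insert_of_ne _ _ (by rintro rfl; exact hu hv)]
        exact hD1 v (List.mem_cons_of_mem _ hv)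
      have h2 : ∀ k, c + 1 ≤ k → (D2.insert c u).get? k = none := by
        intro k hk
        rw [PySem.Dict.get?_insert_of_ne _ _ (by omega)]
        exact hD2 k (by omega)
      have := ih (D1.insert u c) (D2.insert c u) (c + 1) hnd' h1 h2
      rw [this.1, this.2]
      have hD2c : D2.contains c = false := (PySem.Dict.get?_eq_none_iff_contains D2 c).1 (hD2 c le_rfl)
      rw [PySem.Dict.items_insert_of_not_contains _ _ hc1,
          PySem.Dict.items_insert_of_not_contains _ _ hD2c]
      have hm : u ∉ B := by simpa using hb
      simp [specI, specC, hm]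

-- the flattened gap segments B's loop builds from a sorted blossom list, as a recursion
def gapsFlat : List Int → Int → Int → List Int
  | [], prev, n => PySem.List.pyRange prev n 1
  | v :: t, prev, n => PySem.List.pyRange prev v 1 ++ gapsFlat t (v + 1) n

-- B's segment loop computes gapsFlat
theorem b_loop (n : Int) (bs : List Int) (segs : List (List Int)) (prev : Int) :
    ((bs.foldl (fun (st : List (List Int) × Int) v => (st.1 ++ [PySem.List.pyRange st.2 v 1], v + 1)) (segs, prev)).1
      ++ [PySem.List.pyRange (bs.foldl (fun (st : List (List Int) × Int) v => (st.1 ++ [PySem.List.pyRange st.2 v 1], v + 1)) (segs, prev)).2 n 1]).flatten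
    = segs.flatten ++ gapsFlat bs prev n := by
  induction bs generalizing segs prev with
  | nil => simp [gapsFlat]
  | cons v t ih =>
    simp only [List.foldl_cons]
    rw [ih]
    simp [gapsFlat]

-- the gaps of a sorted list of values of [prev-1, n) are exactly the non-members of range(prev, n)
theorem gapsFlat_eq_filter (n : Int) (bs : List Int) (prev : Int)
    (hsort : bs.Pairwise (· ≤ ·)) (hlb : ∀ w ∈ bs, prev ≤ w + 1) (hub : ∀ w ∈ bs, w < n) :
    gapsFlat bs prev n = (PySem.List.pyRange prev n 1).filter (fun u => !(bs.contains u)) := by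
  induction bs generalizing prev with
  | nil => simp [gapsFlat]
  | cons v t ih =>
    have hvt : ∀ w ∈ t, v ≤ w := (List.pairwise_cons.1 hsort).1
    have hsort' := (List.pairwise_cons.1 hsort).2
    have hvn : v < n := hub v List.mem_cons_self
    have hIH := ih (v + 1) hsort' (fun w hw => by have := hvt w hw; omega)
      (fun w hw => hub w (List.mem_cons_of_mem _ hw))
    by_cases hpv : prev ≤ v
    · -- range(prev, n) splits at v; elements below v miss v::t, v is dropped, above v it is t
      rw [PySem.List.pyRange_one_append prev v n hpv (le_of_lt hvn),
          PySem.List.pyRange_one_cons hvn]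
      rw [List.filter_append, List.filter_cons]
      have hvv : ((v :: t).contains v) = true := by simp
      simp only [hvv, Bool.not_true, Bool.false_eq_true, if_false]
      have hlow : (PySem.List.pyRange prev v 1).filter (fun u => !((v :: t).contains u))
          = PySem.List.pyRange prev v 1 := by
        apply List.filter_eq_self.2
        intro u hu
        have hu' := PySem.List.mem_pyRange_one.1 hu
        have : u ∉ (v :: t) := by
          intro hmem
          rcases List.mem_cons.1 hmem with rfl | hmem
          · omega
          · have := hvt u hmem; omega
        simpa using this
      have hhigh : (PySem.List.pyRange (v + 1) n 1).filter (fun u => !((v :: t).contains u))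
          = (PySem.List.pyRange (v + 1) n 1).filter (fun u => !(t.contains u)) := by
        apply List.filter_congr
        intro u hu
        have hu' := PySem.List.mem_pyRange_one.1 hu
        have : (u == v) = false := by simp; omega
        simp only [List.contains_cons, this, Bool.false_or]
      rw [hlow, hhigh, ← hIH]
      simp [gapsFlat]
    · -- duplicate (prev = v + 1): the gap range is empty and v is below the whole range
      have hpv' : prev = v + 1 := by have := hlb v List.mem_cons_self; omega
      subst hpv'
      have hempty : PySem.List.pyRange (v + 1) v 1 = [] := by
        simp [PySem.List.pyRange]
      have hsame : (PySem.List.pyRange (v + 1) n 1).filter (fun u => !((v :: t).contains u))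
          = (PySem.List.pyRange (v + 1) n 1).filter (fun u => !(t.contains u)) := by
        apply List.filter_congr
        intro u hu
        have hu' := PySem.List.mem_pyRange_one.1 hu
        have : (u == v) = false := by simp; omega
        simp only [List.contains_cons, this, Bool.false_or]
      rw [hsame, ← hIH]
      simp [gapsFlat, hempty]

-- B's non_blossom list is the filtered range
theorem non_blossom_eq_filter (n : Int) (B : List Int) :
    gapsFlat (PySem.List.sorted (B.filter (fun v => decide (0 ≤ v) && decide (v < n))) (fun x => x)) 0 n
      = (PySem.List.pyRange 0 n 1).filter (fun u => !(B.contains u)) := by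
  set bs := PySem.List.sorted (B.filter (fun v => decide (0 ≤ v) && decide (v < n))) (fun x => x) with hbs
  have hmem : ∀ w, w ∈ bs ↔ (w ∈ B ∧ 0 ≤ w ∧ w < n) := by
    intro w
    rw [hbs, PySem.List.mem_sorted, List.mem_filter]
    simp
  have hsort : bs.Pairwise (· ≤ ·) := PySem.List.sorted_pairwise _ (fun x => x)
  rw [gapsFlat_eq_filter n bs 0 hsort
      (fun w hw => by have := (hmem w).1 hw; omega)
      (fun w hw => ((hmem w).1 hw).2.2)]
  apply List.filter_congr
  intro u hu
  have hu' := PySem.List.mem_pyRange_one.1 hu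
  have hiff : u ∈ bs ↔ u ∈ B :=
    ⟨fun h => ((hmem u).1 h).1, fun h => (hmem u).2 ⟨h, hu'.1, hu'.2⟩⟩
  simp [hiff]

-- B's enumerate-of-filter is specC
theorem enumerate_filter_eq_specC (B : List Int) (xs : List Int) (c : Int) :
    PySem.List.enumerate (xs.filter (fun u => !(B.contains u))) c = specC B xs c := by
  induction xs generalizing c with
  | nil => rfl
  | cons u t ih =>
    by_cases hb : B.contains u = true
    · have hm : u ∈ B := by simpa using hb
      simp [specC, hm]
      simpa using ih c
    · have hm : u ∉ B := by simpa using hb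
      simp [specC, hm, PySem.List.enumerate_cons]
      simpa using ih (c + 1)

-- B's cmap.get(u, 0) comprehension is specI
theorem map_rank_eq_specI (B : List Int) (xs : List Int) (c : Int) (d : PySem.Dict Int Int)
    (hnd : xs.Nodup) (hd : ∀ u ∈ xs, d.get? u = none) :
    xs.map (fun u =>
      (u, (((PySem.List.enumerate (xs.filter (fun u => !(B.contains u))) c).map
              (fun p => (p.2, p.1))).foldl
            (fun (d : PySem.Dict Int Int) p => d.insert p.1 p.2) d).getD u 0))
      = specI B xs c := by
  induction xs generalizing c d with
  | nil => rfl
  | cons u t ih =>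
    have hnd' := (List.nodup_cons.1 hnd).2
    have hu : u ∉ t := (List.nodup_cons.1 hnd).1
    have hnotkey : ∀ p ∈ (PySem.List.enumerate (t.filter (fun v => !(B.contains v))) (c + 1)).map
        (fun p => (p.2, p.1)), p.1 ≠ u := by
      intro p hp
      rintro rfl
      exact hu (mem_swap_enumerate_filter B t (c + 1) p hp)
    by_cases hb : B.contains u = true
    · have hm : u ∈ B := by simpa using hb
      have hfilter : (u :: t).filter (fun v => !(B.contains v)) = t.filter (fun v => !(B.contains v)) := by
        simp [hm]
      rw [List.map_cons, hfilter]
      have hhead : ∀ c', (((PySem.List.enumerate (t.filter (fun v => !(B.contains v))) c').map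
            (fun p => (p.2, p.1))).foldl
          (fun (d : PySem.Dict Int Int) p => d.insert p.1 p.2) d).getD u 0 = 0 := by
        intro c'
        have hnk : ∀ p ∈ (PySem.List.enumerate (t.filter (fun v => !(B.contains v))) c').map
            (fun p => (p.2, p.1)), p.1 ≠ u := by
          intro p hp; rintro rfl
          exact hu (mem_swap_enumerate_filter B t c' p hp)
        rw [PySem.Dict.getD, foldl_insert_get?_of_not_key _ _ _ hnk,
            hd u List.mem_cons_self]
        rfl
      rw [hhead c]
      have := ih c d hnd' (fun v hv => hd v (List.mem_cons_of_mem _ hv))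
      simp only [specI, hb, reduceIte]
      exact congrArg _ this
    · have hm : u ∉ B := by simpa using hb
      have hfilter : (u :: t).filter (fun v => !(B.contains v)) = u :: t.filter (fun v => !(B.contains v)) := by
        simp [hm]
      rw [List.map_cons, hfilter, PySem.List.enumerate_cons, List.map_cons, List.foldl_cons]
      have hhead : (((PySem.List.enumerate (t.filter (fun v => !(B.contains v))) (c + 1)).map
            (fun p => (p.2, p.1))).foldl
          (fun (d : PySem.Dict Int Int) p => d.insert p.1 p.2) (d.insert u c)).getD u 0 = c := by
        rw [PySem.Dict.getD, foldl_insert_get?_of_not_key _ _ _ hnotkey,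
            PySem.Dict.get?_insert_self]
        rfl
      rw [hhead]
      have hd' : ∀ v ∈ t, (d.insert u c).get? v = none := by
        intro v hv
        rw [PySem.Dict.get?_insert_of_ne _ _ (by rintro rfl; exact hu hv)]
        exact hd v (List.mem_cons_of_mem _ hv)
      have := ih (c + 1) (d.insert u c) hnd' hd'
      have hbf : B.contains u = false := by simpa using hb
      simp only [specI, hbf, Bool.false_eq_true, if_false]
      exact congrArg _ this

-- ===== VERDICT (by name: the statement is the Claim_ definition above) =====
theorem get_contracted_ids_py_spec : Claim_equal_get_contracted_ids_py := by
  intro n B _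
  unfold Spec_get_contracted_ids_py
  have hport : get_contracted_ids_py n B =
      (((PySem.List.pyRange 0 n 1).foldl (aStep B) (PySem.Dict.empty, PySem.Dict.empty, 1)).1.items,
       ((PySem.List.pyRange 0 n 1).foldl (aStep B) (PySem.Dict.empty, PySem.Dict.empty, 1)).2.1.items) := rfl
  rw [hport]
  unfold get_contracted_ids_py_alt
  simp only []
  rw [b_loop n _ [] 0, List.flatten_nil, List.nil_append, non_blossom_eq_filter n B]
  have hnd := PySem.List.nodup_pyRange_one 0 n
  have hA := a_loop B (PySem.List.pyRange 0 n 1) PySem.Dict.empty PySem.Dict.empty 1 hnd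
    (fun u _ => PySem.Dict.get?_empty u) (fun k _ => PySem.Dict.get?_empty k)
  rw [hA.1, hA.2]
  have hI := map_rank_eq_specI B (PySem.List.pyRange 0 n 1) 1 PySem.Dict.empty hnd
    (fun u _ => PySem.Dict.get?_empty u)
  have hC := enumerate_filter_eq_specC B (PySem.List.pyRange 0 n 1) 1
  rw [hI, hC]
  rfl
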